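-- pv_equiv track=rewrite | github.com/jjungyeun/AlgorithmStudy2021 | SA/2104/5201.py | getMostWeight
-- ===== SOURCE A (Python) =====
-- def getMostWeight(N, M, w, t):
--     isVisited = [0 for i in range(N)]
--     weight = 0
--
--     for t_i in t:
--         for j in range(N-1, -1, -1):
--             if isVisited[j] or t_i < w[j]:
--                 continue
--             weight += w[j]
--             isVisited[j] = 1
--             break
--
--     return weight
-- ===== SOURCE B (Python) =====
-- def getMostWeight(N, M, w, t):
--     # remaining weights, rightmost item first; each truck pops the first one that fits
--     remaining = [w[j] for j in range(N - 1, -1, -1)]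
--     total = 0
--     for t_i in t:
--         for k in range(len(remaining)):
--             if remaining[k] <= t_i:
--                 total += remaining.pop(k)
--                 break
--     return total
-- ===== Notes on version B (the rewrite author's own statement) =====
-- stated objective: faster
-- what changed: B replaces A's visited-flag array, rescanned from index N-1 past already-taken items on every truck, by a shrinking list of the remaining weights in right-to-left order from which the first fitting weight is popped, so taken items are deleted and never rescanned.
-- outside the precondition, e.g. on getMostWeight(2, 0, [5], []): A returns 0, B raises IndexError
import Mathlib
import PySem

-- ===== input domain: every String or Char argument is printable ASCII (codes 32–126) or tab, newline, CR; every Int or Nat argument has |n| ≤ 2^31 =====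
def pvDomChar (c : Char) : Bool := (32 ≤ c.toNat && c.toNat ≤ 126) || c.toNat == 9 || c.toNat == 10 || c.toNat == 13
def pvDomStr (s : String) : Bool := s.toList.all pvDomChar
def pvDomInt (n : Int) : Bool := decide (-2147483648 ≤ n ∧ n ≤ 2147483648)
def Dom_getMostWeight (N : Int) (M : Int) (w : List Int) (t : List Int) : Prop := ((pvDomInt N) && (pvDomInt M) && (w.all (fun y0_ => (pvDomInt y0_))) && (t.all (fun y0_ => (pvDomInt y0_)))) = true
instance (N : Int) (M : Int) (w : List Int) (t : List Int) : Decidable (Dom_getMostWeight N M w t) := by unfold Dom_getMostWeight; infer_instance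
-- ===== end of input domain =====

-- B keeps the remaining weights (rightmost first) in one shrinking list and pops the first
-- fitting weight per truck, instead of A's visited-flag array rescanned from the right each time.

-- ===== PORT A =====
-- inner loop 'for j in range(N-1, -1, -1)'; list indexing is pyGetD/pySetD (exact under
-- Pre_getMostWeight, which keeps every index in range)
def aInner (w : List Int) (ti : Int) : List Int → List Int × Int → List Int × Int
  | [], st => st
  | j :: js, (vis, weight) =>
    if PySem.List.pyGetD vis j 0 ≠ 0 ∨ ti < PySem.List.pyGetD w j 0 then
      aInner w ti js (vis, weight)
    else
      (PySem.List.pySetD vis j 1, weight + PySem.List.pyGetD w j 0)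

def getMostWeight (N : Int) (M : Int) (w : List Int) (t : List Int) : Int :=
  let isVisited := (PySem.List.pyRange 0 N 1).map (fun _ => (0 : Int))
  (t.foldl (fun st ti => aInner w ti (PySem.List.pyRange (N - 1) (-1) (-1)) st) (isVisited, 0)).2

-- ===== PORT B =====
-- Source B's inner loop: scan `remaining` from the front, pop the first weight ≤ ti
def bPick (ti : Int) : List Int → Option (Int × List Int)
  | [] => none
  | x :: xs =>
    if x ≤ ti then some (x, xs)
    else match bPick ti xs with
      | none => none
      | some (y, rest) => some (y, x :: rest)

def getMostWeight_alt (N : Int) (M : Int) (w : List Int) (t : List Int) : Int :=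
  let remaining := (PySem.List.pyRange (N - 1) (-1) (-1)).map (fun j => PySem.List.pyGetD w j 0)
  (t.foldl (fun st ti =>
      match bPick ti st.1 with
      | some (x, rest) => (rest, st.2 + x)
      | none => st) (remaining, (0 : Int))).2

-- ===== PRECONDITION & SPEC =====
-- Pre_ excludes N > len(w): there A raises IndexError for every nonempty t (and B at once),
-- returning 0 only accidentally when t is empty.
def Pre_getMostWeight (N : Int) (M : Int) (w : List Int) (t : List Int) : Prop :=
  N ≤ (w.length : Int)
instance (N : Int) (M : Int) (w : List Int) (t : List Int) : Decidable (Pre_getMostWeight N M w t) := by unfold Pre_getMostWeight; infer_instance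

def pvWitness_getMostWeight : Int × Int × List Int × List Int := (3, 0, [1, 2, 3], [2, 3])

def Spec_getMostWeight (N : Int) (M : Int) (w : List Int) (t : List Int) (out : Int) : Prop := out = getMostWeight_alt N M w t
instance (N : Int) (M : Int) (w : List Int) (t : List Int) (out : Int) : Decidable (Spec_getMostWeight N M w t out) := by unfold Spec_getMostWeight; infer_instance

-- ===== CLAIM =====
def Claim_equal_getMostWeight : Prop := ∀ (N : Int) (M : Int) (w : List Int) (t : List Int), Dom_getMostWeight N M w t → Pre_getMostWeight N M w t → Spec_getMostWeight N M w t (getMostWeight N M w t)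

-- ===== LEMMAS AND PROOFS =====

-- the list B maintains, expressed from A's state: weights of the still-unvisited indices of js
def pvRem (w vis js : List Int) : List Int :=
  (js.filter (fun j => decide (PySem.List.pyGetD vis j 0 = 0))).map
    (fun j => PySem.List.pyGetD w j 0)

lemma pvGetD_set_self (vis : List Int) (j : Int) (h0 : 0 ≤ j) (hj : j < (vis.length : Int)) :
    PySem.List.pyGetD (PySem.List.pySetD vis j 1) j 0 = 1 := by
  rw [PySem.List.pySetD_of_nonneg vis 1 h0,
      PySem.List.pyGetD_eq_getElem _ _ h0 (by simpa using hj)]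
  rw [List.getElem_set]
  simp

lemma pvGetD_set_ne (vis : List Int) (j i : Int) (h0 : 0 ≤ j)
    (h0i : 0 ≤ i) (hne : i ≠ j) :
    PySem.List.pyGetD (PySem.List.pySetD vis j 1) i 0 = PySem.List.pyGetD vis i 0 := by
  rw [PySem.List.pySetD_of_nonneg vis 1 h0]
  by_cases hi : i < (vis.length : Int)
  · rw [PySem.List.pyGetD_eq_getElem _ _ h0i (by simpa using hi),
        PySem.List.pyGetD_eq_getElem _ _ h0i hi]
    rw [List.getElem_set]
    rw [if_neg (by omega : ¬ j.toNat = i.toNat)]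
  · rw [PySem.List.pyGetD_of_none _ _ _ (by
        rw [PySem.List.pyGet?_eq_none_iff]
        simp only [List.length_set]
        intro hr
        rcases hr with ⟨h1, h2⟩
        omega),
      PySem.List.pyGetD_of_none _ _ _ (by
        rw [PySem.List.pyGet?_eq_none_iff]
        intro hr
        rcases hr with ⟨h1, h2⟩
        omega)]


lemma pvStep (w : List Int) (ti : Int) :
    ∀ (js vis : List Int) (weight : Int), js.Nodup →
      (∀ j ∈ js, 0 ≤ j ∧ j < (vis.length : Int)) →
      (aInner w ti js (vis, weight)).1.length = vis.length ∧
      (∀ i : Int, 0 ≤ i → i ∉ js →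
        PySem.List.pyGetD (aInner w ti js (vis, weight)).1 i 0 = PySem.List.pyGetD vis i 0) ∧
      (match bPick ti (pvRem w vis js) with
       | none => aInner w ti js (vis, weight) = (vis, weight)
       | some (x, rest) =>
           (aInner w ti js (vis, weight)).2 = weight + x ∧
           pvRem w (aInner w ti js (vis, weight)).1 js = rest) := by
  intro js
  induction js with
  | nil =>
    intro vis weight _ _
    refine ⟨rfl, fun i _ _ => rfl, ?_⟩
    simp [pvRem, bPick, aInner]
  | cons j js ih =>
    intro vis weight hnd hb
    have hj0 : 0 ≤ j := (hb j (by simp)).1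
    have hjl : j < (vis.length : Int) := (hb j (by simp)).2
    have hjn : j ∉ js := (List.nodup_cons.mp hnd).1
    have hnd' : js.Nodup := (List.nodup_cons.mp hnd).2
    have hb' : ∀ j' ∈ js, 0 ≤ j' ∧ j' < (vis.length : Int) := fun j' h => hb j' (by simp [h])
    by_cases hv : PySem.List.pyGetD vis j 0 = 0
    · -- unvisited: head appears in pvRem
      have hrem : pvRem w vis (j :: js)
          = PySem.List.pyGetD w j 0 :: pvRem w vis js := by
        simp [pvRem, hv]
      by_cases hle : PySem.List.pyGetD w j 0 ≤ ti
      · -- taken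
        have hstep : aInner w ti (j :: js) (vis, weight)
            = (PySem.List.pySetD vis j 1, weight + PySem.List.pyGetD w j 0) := by
          simp [aInner, hv, not_lt.mpr hle]
        rw [hrem, hstep]
        refine ⟨PySem.List.length_pySetD vis j 1, ?_, ?_⟩
        · intro i h0i hi
          exact pvGetD_set_ne vis j i hj0 h0i (by simp at hi; exact fun h => hi.1 h)
        · have hbp : bPick ti (PySem.List.pyGetD w j 0 :: pvRem w vis js)
              = some (PySem.List.pyGetD w j 0, pvRem w vis js) := by
            simp [bPick, hle]
          rw [hbp]
          refine ⟨rfl, ?_⟩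
          -- pvRem over (j::js) with vis.set: head dropped, tail unchanged
          simp only [pvRem, List.filter_cons]
          rw [pvGetD_set_self vis j hj0 hjl]
          simp only [decide_eq_true_eq]
          rw [if_neg (by norm_num)]
          congr 1
          apply List.filter_congr
          intro j' hj'
          rw [pvGetD_set_ne vis j j' hj0 (hb' j' hj').1 (fun h => hjn (h ▸ hj'))]
      · -- too heavy: skip, recurse
        have hstep : aInner w ti (j :: js) (vis, weight)
            = aInner w ti js (vis, weight) := by
          simp [aInner, hv, lt_of_not_ge hle]
        obtain ⟨ih1, ih2, ih3⟩ := ih vis weight hnd' hb'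
        rw [hrem, hstep]
        refine ⟨ih1, fun i h0i hi => ih2 i h0i (by simp at hi; exact hi.2), ?_⟩
        simp only [bPick, if_neg hle]
        cases hp : bPick ti (pvRem w vis js) with
        | none =>
          rw [hp] at ih3
          simpa using ih3
        | some p =>
          obtain ⟨y, rest⟩ := p
          rw [hp] at ih3
          obtain ⟨e1, e2⟩ := ih3
          refine ⟨e1, ?_⟩
          simp only [pvRem, List.filter_cons]
          have : PySem.List.pyGetD (aInner w ti js (vis, weight)).1 j 0 = 0 := by
            rw [ih2 j hj0 hjn]; exact hv
          rw [this]
          simp only [decide_true, if_true, List.map_cons]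
          exact congrArg (List.cons (PySem.List.pyGetD w j 0)) e2
    · -- visited: head filtered out and A skips it
      have hrem : pvRem w vis (j :: js) = pvRem w vis js := by
        simp [pvRem, hv]
      have hstep : aInner w ti (j :: js) (vis, weight)
          = aInner w ti js (vis, weight) := by
        simp [aInner, hv]
      obtain ⟨ih1, ih2, ih3⟩ := ih vis weight hnd' hb'
      rw [hrem, hstep]
      refine ⟨ih1, fun i h0i hi => ih2 i h0i (by simp at hi; exact hi.2), ?_⟩
      cases hp : bPick ti (pvRem w vis js) with
      | none =>
        rw [hp] at ih3
        simpa using ih3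
      | some p =>
        obtain ⟨y, rest⟩ := p
        rw [hp] at ih3
        obtain ⟨e1, e2⟩ := ih3
        refine ⟨e1, ?_⟩
        have hj' : PySem.List.pyGetD (aInner w ti js (vis, weight)).1 j 0
            = PySem.List.pyGetD vis j 0 := ih2 j hj0 hjn
        simp only [pvRem, List.filter_cons, hj', hv, decide_false]
        exact e2

lemma pvFold (w js : List Int) (hnd : js.Nodup) :
    ∀ (ts vis : List Int) (acc : Int),
      (∀ j ∈ js, 0 ≤ j ∧ j < (vis.length : Int)) →
      (ts.foldl (fun st ti => aInner w ti js st) (vis, acc)).2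
        = (ts.foldl (fun st ti =>
            match bPick ti st.1 with
            | some (x, rest) => (rest, st.2 + x)
            | none => st) (pvRem w vis js, acc)).2 := by
  intro ts
  induction ts with
  | nil => intro vis acc _; rfl
  | cons ti ts ihts =>
    intro vis acc hb
    obtain ⟨h1, _, h3⟩ := pvStep w ti js vis acc hnd hb
    simp only [List.foldl_cons]
    cases hp : bPick ti (pvRem w vis js) with
    | none =>
      rw [hp] at h3
      rw [h3]
      exact ihts vis acc hb
    | some p =>
      obtain ⟨x, rest⟩ := p
      rw [hp] at h3
      obtain ⟨e1, e2⟩ := h3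
      have hA : aInner w ti js (vis, acc)
          = ((aInner w ti js (vis, acc)).1, acc + x) := by
        rw [← e1]
      rw [hA, ← e2]
      exact ihts (aInner w ti js (vis, acc)).1 (acc + x)
        (fun j hj => ⟨(hb j hj).1, by rw [h1]; exact (hb j hj).2⟩)

lemma pvMain (N : Int) (w t : List Int) :
    (let isVisited := (PySem.List.pyRange 0 N 1).map (fun _ => (0 : Int))
     (t.foldl (fun st ti => aInner w ti (PySem.List.pyRange (N - 1) (-1) (-1)) st) (isVisited, 0)).2)
    = (let remaining := (PySem.List.pyRange (N - 1) (-1) (-1)).map (fun j => PySem.List.pyGetD w j 0)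
       (t.foldl (fun st ti =>
          match bPick ti st.1 with
          | some (x, rest) => (rest, st.2 + x)
          | none => st) (remaining, (0 : Int))).2) := by
  have hnd : (PySem.List.pyRange (N - 1) (-1) (-1)).Nodup := by
    rw [PySem.List.pyRange_neg_one_eq_reverse]
    exact List.nodup_reverse.mpr (PySem.List.nodup_pyRange_one _ _)
  have hmem : ∀ j ∈ PySem.List.pyRange (N - 1) (-1) (-1), 0 ≤ j ∧ j < N := by
    intro j hj
    have := PySem.List.mem_pyRange_neg_one.mp hj
    omega
  have hlen : (((PySem.List.pyRange 0 N 1).map (fun _ => (0 : Int))).length : Int)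
      = max N 0 := by
    simp [PySem.List.length_pyRange_one]
  have hb : ∀ j ∈ PySem.List.pyRange (N - 1) (-1) (-1),
      0 ≤ j ∧ j < (((PySem.List.pyRange 0 N 1).map (fun _ => (0 : Int))).length : Int) := by
    intro j hj
    obtain ⟨a, b⟩ := hmem j hj
    rw [hlen]
    omega
  have hR : pvRem w ((PySem.List.pyRange 0 N 1).map (fun _ => (0 : Int)))
      (PySem.List.pyRange (N - 1) (-1) (-1))
      = (PySem.List.pyRange (N - 1) (-1) (-1)).map (fun j => PySem.List.pyGetD w j 0) := by
    unfold pvRem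
    congr 1
    apply List.filter_eq_self.mpr
    intro j hj
    obtain ⟨a, b⟩ := hmem j hj
    rw [PySem.List.pyGetD_map_pyRange_of_nonneg (fun _ => (0 : Int)) N j 0 a b]
    simp
  simp only []
  rw [pvFold w _ hnd t _ 0 hb, hR]

-- ===== VERDICT =====
theorem getMostWeight_spec : Claim_equal_getMostWeight := by
  intro N M w t _ _
  unfold Spec_getMostWeight getMostWeight getMostWeight_alt
  exact pvMain N w t
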